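-- pv_equiv track=rewrite | github.com/xmpuspus/cloudwright | packages/core/cloudwright/ascii_diagram.py | _merge_boxes_with_arrows
-- ===== SOURCE A (Python) =====
-- def _merge_boxes_with_arrows(boxes: list[list[str]]) -> list[str]:
--     """Merge boxes side-by-side, inserting ──▶ between them at the content row."""
--     max_h = max(len(b) for b in boxes)
--     # All boxes have the same height (4 lines), but pad just in case
--     widths = [len(b[0]) for b in boxes]  # visual width from top border
--     arrow = "──▶"
--     arrow_row = 2  # second content line (0=top, 1=line1, 2=line2, 3=bot)
--
--     result = []
--     for row in range(max_h):
--         parts = []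
--         for i, box in enumerate(boxes):
--             if row < len(box):
--                 parts.append(box[row])
--             else:
--                 parts.append(" " * widths[i])
--             if i < len(boxes) - 1:
--                 parts.append(arrow if row == arrow_row else " " * len(arrow))
--         result.append("".join(parts))
--     return result
-- ===== SOURCE B (Python) =====
-- def _merge_boxes_with_arrows(boxes: list[list[str]]) -> list[str]:
--     """Column-first: pad each box to a full-height block, interleave with
--     separator blocks, then emit each output line by joining the blocks' rows."""
--     max_h = max(len(b) for b in boxes)
--     blocks = []
--     for b in boxes:
--         blocks.append(b + [" " * len(b[0])] * (max_h - len(b)))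
--     sep = ["──▶" if r == 2 else "   " for r in range(max_h)]
--     cols = []
--     for i, blk in enumerate(blocks):
--         if i > 0:
--             cols.append(sep)
--         cols.append(blk)
--     return ["".join(col[r] for col in cols) for r in range(max_h)]
-- ===== Notes on version B (the rewrite author's own statement) =====
-- stated objective: alternative
-- what changed: B inverts the loop nesting: it first pads every box into a full-height column block and materializes a separator block, interleaves them into a column list, and then emits each output line by joining the r-th row of every column, instead of A's row-first loop that decides per cell between box row, padding and arrow.
-- outside the precondition, e.g. on _merge_boxes_with_arrows([]): A raises ValueError, B raises ValueError
import Mathlib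
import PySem

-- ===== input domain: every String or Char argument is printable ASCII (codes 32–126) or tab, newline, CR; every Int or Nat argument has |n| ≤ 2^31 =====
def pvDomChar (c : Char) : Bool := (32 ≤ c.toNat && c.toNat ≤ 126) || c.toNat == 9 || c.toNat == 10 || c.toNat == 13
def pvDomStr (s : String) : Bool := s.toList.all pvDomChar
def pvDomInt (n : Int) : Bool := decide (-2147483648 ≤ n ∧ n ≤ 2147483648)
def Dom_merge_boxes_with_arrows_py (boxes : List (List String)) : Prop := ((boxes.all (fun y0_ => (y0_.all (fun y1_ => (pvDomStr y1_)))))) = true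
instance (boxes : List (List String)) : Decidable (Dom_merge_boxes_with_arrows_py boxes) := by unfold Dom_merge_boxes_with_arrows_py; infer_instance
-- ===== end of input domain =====

-- B merges the boxes column-first (padded full-height blocks interleaved with separator
-- blocks, one join per output row) instead of A's row-first per-cell branching.

-- " " * n  (Python string repetition; exact: a non-positive n gives "")
def pvSpaces (n : Int) : String := String.ofList (List.replicate n.toNat ' ')

-- ===== PORT A =====
def merge_boxes_with_arrows_py (boxes : List (List String)) : List String :=
  -- max_h = max(len(b) for b in boxes); Python raises ValueError on boxes = [] (excluded by Pre_)
  let max_h : Int := (PySem.List.max? (boxes.map (fun b => PySem.List.len b)) (fun x => x)).getD 0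
  -- widths = [len(b[0]) for b in boxes]; b[0] raises IndexError on an empty box (excluded by Pre_)
  let widths : List Int := boxes.map (fun b => PySem.Str.len ((PySem.List.pyGet? b 0).getD ""))
  let arrow : String := "──▶"
  (PySem.List.pyRange 0 max_h 1).foldl (fun result row =>
    let parts : List String :=
      (PySem.List.enumerate boxes 0).foldl (fun parts p =>
        if p.1 < (boxes.length : Int) - 1 then
          (parts ++ [if row < PySem.List.len p.2 then (PySem.List.pyGet? p.2 row).getD ""
                     else pvSpaces (PySem.List.pyGetD widths p.1 0)])
            ++ [if row = 2 then arrow else pvSpaces (PySem.Str.len arrow)]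
        else
          parts ++ [if row < PySem.List.len p.2 then (PySem.List.pyGet? p.2 row).getD ""
                    else pvSpaces (PySem.List.pyGetD widths p.1 0)]) []
    result ++ [PySem.Str.join "" parts]) []

-- ===== PORT B =====
def merge_boxes_with_arrows_py_alt (boxes : List (List String)) : List String :=
  let max_h : Int := (PySem.List.max? (boxes.map (fun b => PySem.List.len b)) (fun x => x)).getD 0
  let blocks : List (List String) := boxes.foldl (fun blocks b =>
    blocks ++ [b ++ PySem.List.pyRepeat [pvSpaces (PySem.Str.len ((PySem.List.pyGet? b 0).getD ""))]
                      (max_h - PySem.List.len b)]) []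
  let sep : List String := (PySem.List.pyRange 0 max_h 1).map (fun q => if q = 2 then "──▶" else "   ")
  let cols : List (List String) := (PySem.List.enumerate blocks 0).foldl (fun cols p =>
    (if 0 < p.1 then cols ++ [sep] else cols) ++ [p.2]) []
  (PySem.List.pyRange 0 max_h 1).map (fun r =>
    PySem.Str.join "" (cols.map (fun col => PySem.List.pyGetD col r "")))

-- ===== PRECONDITION & SPEC =====
-- Pre_ excludes exactly the inputs on which Python A raises: boxes = [] (max() of an
-- empty sequence, ValueError) and any empty box (b[0], IndexError); B raises there too.
def Pre_merge_boxes_with_arrows_py (boxes : List (List String)) : Prop :=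
  boxes ≠ [] ∧ ∀ b ∈ boxes, b ≠ []
instance (boxes : List (List String)) : Decidable (Pre_merge_boxes_with_arrows_py boxes) := by
  unfold Pre_merge_boxes_with_arrows_py; infer_instance

def pvWitness_merge_boxes_with_arrows_py : List (List String) := [["+--+", "|a|", "|b|", "+--+"], ["x"]]

def Spec_merge_boxes_with_arrows_py (boxes : List (List String)) (out : List String) : Prop := out = merge_boxes_with_arrows_py_alt boxes
instance (boxes : List (List String)) (out : List String) : Decidable (Spec_merge_boxes_with_arrows_py boxes out) := by unfold Spec_merge_boxes_with_arrows_py; infer_instance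

-- ===== CLAIM (what is proved, stated in full; the proofs are below) =====
def Claim_equal_merge_boxes_with_arrows_py : Prop := ∀ (boxes : List (List String)), Dom_merge_boxes_with_arrows_py boxes → Pre_merge_boxes_with_arrows_py boxes → Spec_merge_boxes_with_arrows_py boxes (merge_boxes_with_arrows_py boxes)

-- ===== LEMMAS AND PROOFS =====

-- the value both programs put in output row r for box b
-- (A computes it inline per cell, B reads it off the padded block)
def pvCell (r : Int) (b : List String) : String :=
  if r < PySem.List.len b then (PySem.List.pyGet? b r).getD ""
  else pvSpaces (PySem.Str.len ((PySem.List.pyGet? b 0).getD ""))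

def pvSep (r : Int) : String := if r = 2 then "──▶" else "   "

def pvBlock (H : Int) (b : List String) : List String :=
  b ++ List.replicate (H - PySem.List.len b).toNat (pvSpaces (PySem.Str.len ((PySem.List.pyGet? b 0).getD "")))

-- A's inner loop (separator appended after every non-last box) builds the interspersed row
theorem pv_seqA (cf : List String → String) (sp : String) :
    ∀ (bs : List (List String)) (s n : Int) (acc : List String), s + bs.length = n →
    (PySem.List.enumerate bs s).foldl
      (fun parts p => if p.1 < n - 1 then (parts ++ [cf p.2]) ++ [sp] else parts ++ [cf p.2]) acc
    = acc ++ List.intersperse sp (bs.map cf) := by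
  intro bs
  induction bs with
  | nil => intro s n acc h; simp [PySem.List.enumerate_nil]
  | cons b bs ih =>
    intro s n acc h
    rw [PySem.List.enumerate_cons, List.foldl_cons]
    cases bs with
    | nil =>
      have hnlt : ¬ (s < n - 1) := by simp at h; omega
      simp [PySem.List.enumerate_nil, hnlt]
    | cons b' bs' =>
      have hlt : s < n - 1 := by simp at h; omega
      have h' : (s + 1) + ((b' :: bs').length : Int) = n := by simp at h ⊢; omega
      rw [ih (s + 1) n _ h']
      simp only [if_pos hlt, List.map_cons, List.intersperse_cons₂]
      simp [List.append_assoc]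

-- B's column loop, past the first block, appends [sep, block] for every further block
theorem pv_seqB (sep : List String) :
    ∀ (bs : List (List String)) (s : Int) (acc : List (List String)), 1 ≤ s →
    (PySem.List.enumerate bs s).foldl
      (fun cols p => (if 0 < p.1 then cols ++ [sep] else cols) ++ [p.2]) acc
    = acc ++ bs.flatMap (fun b => [sep, b]) := by
  intro bs
  induction bs with
  | nil => intro s acc h; simp [PySem.List.enumerate_nil]
  | cons b bs ih =>
    intro s acc h
    have hs : (0 : Int) < s := by omega
    rw [PySem.List.enumerate_cons, List.foldl_cons, ih (s + 1) _ (by omega)]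
    simp only [if_pos hs]
    simp [List.append_assoc]

theorem pv_interleave_map {α β : Type} (g : α → β) (sp : α) :
    ∀ (xs : List α) (x : α),
    (x :: xs.flatMap (fun b => [sp, b])).map g = List.intersperse (g sp) ((x :: xs).map g) := by
  intro xs
  induction xs with
  | nil => intro x; simp
  | cons y ys ih =>
    intro x
    have h2 := ih y
    simp only [List.map_cons] at h2
    simp only [List.flatMap_cons, List.cons_append, List.map_cons, List.map_append,
      List.intersperse_cons₂]
    rw [← h2]
    simp

theorem pv_rowSep (H r : Int) (h0 : 0 ≤ r) (h1 : r < H) :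
    PySem.List.pyGetD ((PySem.List.pyRange 0 H 1).map (fun q => if q = 2 then "──▶" else "   ")) r "" = pvSep r := by
  have hH : 0 ≤ H := le_trans h0 (le_of_lt h1)
  have e1 : H = (H.toNat : Int) := (Int.toNat_of_nonneg hH).symm
  have e2 : r = (r.toNat : Int) := (Int.toNat_of_nonneg h0).symm
  rw [e1, e2, PySem.List.pyGetD_map_pyRange _ H.toNat r.toNat _ (by omega)]
  unfold pvSep
  rw [← e2]

theorem pv_rowBlock (H r : Int) (b : List String) (h0 : 0 ≤ r) (h1 : r < H)
    (hb : (b.length : Int) ≤ H) :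
    PySem.List.pyGetD (pvBlock H b) r "" = pvCell r b := by
  unfold pvBlock pvCell
  have hlen : ((b ++ List.replicate (H - PySem.List.len b).toNat
      (pvSpaces (PySem.Str.len ((PySem.List.pyGet? b 0).getD "")))).length : Int) = H := by
    simp [PySem.List.len_eq]; omega
  rw [PySem.List.pyGetD_eq_getElem _ _ h0 (by rw [hlen]; exact h1)]
  by_cases hr : r < PySem.List.len b
  · rw [if_pos hr]
    rw [PySem.List.len_eq] at hr
    rw [List.getElem_append_left (by omega : r.toNat < b.length)]
    rw [PySem.List.pyGet?_eq_some_getElem b h0 hr]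
    rfl
  · rw [if_neg hr]
    rw [PySem.List.len_eq] at hr
    rw [List.getElem_append_right (by omega : b.length ≤ r.toNat)]
    exact List.getElem_replicate _

theorem pv_max_bound (boxes : List (List String)) (hne : boxes ≠ []) :
    ∀ b ∈ boxes, (b.length : Int) ≤
      (PySem.List.max? (boxes.map (fun b => PySem.List.len b)) (fun x => x)).getD 0 := by
  intro b hb
  cases hmx : PySem.List.max? (boxes.map (fun b => PySem.List.len b)) (fun x => x) with
  | none =>
    rw [PySem.List.max?_eq_none_iff] at hmx
    exact absurd (List.map_eq_nil_iff.mp hmx) hne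
  | some m =>
    have := PySem.List.max?_isMax hmx (PySem.List.len b) (List.mem_map.mpr ⟨b, hb, rfl⟩)
    simpa [PySem.List.len_eq] using this

-- A's row r equals the interspersed list of cells
theorem pv_rowA (boxes : List (List String)) (r : Int) :
    (PySem.List.enumerate boxes 0).foldl (fun parts p =>
        if p.1 < (boxes.length : Int) - 1 then
          (parts ++ [if r < PySem.List.len p.2 then (PySem.List.pyGet? p.2 r).getD ""
                     else pvSpaces (PySem.List.pyGetD (boxes.map (fun b => PySem.Str.len ((PySem.List.pyGet? b 0).getD ""))) p.1 0)])
            ++ [if r = 2 then "──▶" else pvSpaces (PySem.Str.len "──▶")]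
        else
          parts ++ [if r < PySem.List.len p.2 then (PySem.List.pyGet? p.2 r).getD ""
                    else pvSpaces (PySem.List.pyGetD (boxes.map (fun b => PySem.Str.len ((PySem.List.pyGet? b 0).getD ""))) p.1 0)]) []
    = List.intersperse (pvSep r) (boxes.map (pvCell r)) := by
  have hsep : (if r = 2 then "──▶" else pvSpaces (PySem.Str.len "──▶")) = pvSep r := by
    unfold pvSep
    split_ifs with h
    · rfl
    · decide
  rw [PySem.List.foldl_congr_mem (PySem.List.enumerate boxes 0) _
      (fun parts p => if p.1 < (boxes.length : Int) - 1
        then (parts ++ [pvCell r p.2]) ++ [pvSep r] else parts ++ [pvCell r p.2]) []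
      ?_]
  · exact (pv_seqA (pvCell r) (pvSep r) boxes 0 (boxes.length : Int) [] (by simp)).trans
      (List.nil_append _)
  · intro acc p hp
    rw [PySem.List.mem_enumerate_iff] at hp
    obtain ⟨k, hk, rfl⟩ := hp
    dsimp only
    have hcell : (if r < PySem.List.len boxes[k] then (PySem.List.pyGet? boxes[k] r).getD ""
        else pvSpaces (PySem.List.pyGetD (boxes.map (fun b => PySem.Str.len ((PySem.List.pyGet? b 0).getD ""))) ((0 : Int) + (k : Int)) 0))
        = pvCell r boxes[k] := by
      unfold pvCell
      by_cases hr : r < PySem.List.len boxes[k]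
      · rw [if_pos hr, if_pos hr]
      · rw [if_neg hr, if_neg hr]
        congr 1
        rw [zero_add, PySem.List.pyGetD_natCast]
        rw [List.getD_eq_getElem _ _ (by simpa using hk)]
        simp
    rw [hcell, hsep]

-- B's row r equals the same interspersed list of cells
theorem pv_rowB (boxes : List (List String)) (H r : Int) (hne : boxes ≠ [])
    (hmax : ∀ b ∈ boxes, (b.length : Int) ≤ H) (h0 : 0 ≤ r) (h1 : r < H) :
    ((PySem.List.enumerate
        (boxes.foldl (fun blocks b =>
          blocks ++ [b ++ PySem.List.pyRepeat [pvSpaces (PySem.Str.len ((PySem.List.pyGet? b 0).getD ""))]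
                            (H - PySem.List.len b)]) []) 0).foldl
      (fun cols p =>
        (if 0 < p.1 then cols ++ [(PySem.List.pyRange 0 H 1).map (fun q => if q = 2 then "──▶" else "   ")] else cols) ++ [p.2]) []).map
      (fun col => PySem.List.pyGetD col r "")
    = List.intersperse (pvSep r) (boxes.map (pvCell r)) := by
  obtain ⟨b0, rest, rfl⟩ : ∃ b0 rest, boxes = b0 :: rest := by
    cases boxes with
    | nil => exact absurd rfl hne
    | cons a l => exact ⟨a, l, rfl⟩
  rw [PySem.List.foldl_append_singleton_eq_map
      (fun b => b ++ PySem.List.pyRepeat [pvSpaces (PySem.Str.len ((PySem.List.pyGet? b 0).getD ""))]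
                      (H - PySem.List.len b)) (b0 :: rest) [], List.nil_append]
  have hblk : List.map (fun b => b ++ PySem.List.pyRepeat [pvSpaces (PySem.Str.len ((PySem.List.pyGet? b 0).getD ""))]
      (H - PySem.List.len b)) (b0 :: rest) = List.map (pvBlock H) (b0 :: rest) := by
    apply List.map_congr_left
    intro b _
    simp [pvBlock, PySem.List.pyRepeat_singleton]
  rw [hblk, List.map_cons, PySem.List.enumerate_cons, List.foldl_cons]
  dsimp only
  rw [if_neg (lt_irrefl (0 : Int)), List.nil_append,
    pv_seqB _ (rest.map (pvBlock H)) (0 + 1) _ (by omega), List.singleton_append,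
    pv_interleave_map (fun col => PySem.List.pyGetD col r "")
      ((PySem.List.pyRange 0 H 1).map (fun q => if q = 2 then "──▶" else "   "))
      (rest.map (pvBlock H)) (pvBlock H b0)]
  have hs := pv_rowSep H r h0 h1
  have hl : List.map (fun col => PySem.List.pyGetD col r "") (pvBlock H b0 :: List.map (pvBlock H) rest)
      = List.map (pvCell r) (b0 :: rest) := by
    rw [← List.map_cons, List.map_map]
    apply List.map_congr_left
    intro b hb
    exact pv_rowBlock H r b h0 h1 (hmax b hb)
  simp only [hs, hl]

-- ===== VERDICT (by name: the statement is the Claim_ definition above) =====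
theorem merge_boxes_with_arrows_py_spec : Claim_equal_merge_boxes_with_arrows_py := by
  intro boxes _ hpre
  obtain ⟨hne, -⟩ := hpre
  unfold Spec_merge_boxes_with_arrows_py
  simp only [merge_boxes_with_arrows_py, merge_boxes_with_arrows_py_alt]
  rw [PySem.List.foldl_append_singleton_eq_map, List.nil_append]
  apply List.map_congr_left
  intro r hr
  rw [PySem.List.mem_pyRange_one] at hr
  congr 1
  rw [pv_rowA boxes r,
    pv_rowB boxes _ r hne (pv_max_bound boxes hne) hr.1 hr.2]
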